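-- pv_equiv track=rewrite | github.com/Tuzass/ear_clipping_viewer | src/functions.py | createTriangleGraph
-- ===== SOURCE A (Python) =====
-- def shareEdge(t1, t2):
--     first = set(t1)
--     second = set(t2)
--     return len(first & second) == 2
--
-- def createTriangleGraph(triangles):
--     vertices = triangles.copy()
--     alists = []
--     for i in range(len(vertices)):
--         alists.append([])
--
--     for i in range(len(vertices)):
--         for j in range(i + 1, len(vertices)):
--             if shareEdge(vertices[i], vertices[j]):
--                 alists[i].append(j)
--                 alists[j].append(i)
--
--     return vertices, alists
-- ===== SOURCE B (Python) =====
-- def createTriangleGraph(triangles):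
--     vertices = triangles.copy()
--
--     # vertex -> list of indices of the triangles containing it (ascending)
--     incidence = {}
--     for idx, t in enumerate(vertices):
--         for v in set(t):
--             incidence.setdefault(v, []).append(idx)
--
--     # (i, j) with i < j  ->  number of distinct vertices shared by triangles i and j
--     common = {}
--     for bucket in incidence.values():
--         while bucket:
--             i, bucket = bucket[0], bucket[1:]
--             for j in bucket:
--                 key = (i, j)
--                 common[key] = common.get(key, 0) + 1
--
--     # triangles sharing exactly two vertices are neighbours
--     alists = [[] for _ in vertices]
--     for (i, j), c in common.items():
--         if c == 2:
--             alists[i].append(j)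
--             alists[j].append(i)
--     for lst in alists:
--         lst.sort()
--     return vertices, alists
-- ===== Notes on version B (the rewrite author's own statement) =====
-- stated objective: alternative
-- what changed: Replaces the all-pairs shareEdge scan by a vertex-to-triangle incidence index: shared-vertex counts are accumulated per vertex bucket and pairs with count exactly 2 become neighbours, sorted ascending to match A's order.
import Mathlib
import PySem

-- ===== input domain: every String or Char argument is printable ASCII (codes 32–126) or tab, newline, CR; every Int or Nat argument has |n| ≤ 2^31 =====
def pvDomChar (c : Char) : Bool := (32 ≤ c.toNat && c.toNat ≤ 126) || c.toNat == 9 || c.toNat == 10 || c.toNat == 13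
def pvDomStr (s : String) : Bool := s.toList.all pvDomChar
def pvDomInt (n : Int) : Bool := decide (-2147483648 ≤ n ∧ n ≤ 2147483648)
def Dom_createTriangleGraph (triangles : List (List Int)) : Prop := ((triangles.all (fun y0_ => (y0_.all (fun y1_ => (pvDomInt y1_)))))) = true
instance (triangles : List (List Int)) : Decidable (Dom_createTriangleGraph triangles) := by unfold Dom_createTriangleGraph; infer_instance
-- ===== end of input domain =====

-- B replaces A's all-pairs shared-edge test by a vertex→triangle incidence index plus
-- per-vertex shared-vertex counting (objective: alternative algorithm, same result).

-- ===== PORT A =====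
def shareEdge (t1 t2 : List Int) : Bool :=
  let first := PySem.Set.ofList t1
  let second := PySem.Set.ofList t2
  PySem.Set.len (PySem.Set.inter first second) == 2

def createTriangleGraph (triangles : List (List Int)) : List (List Int) × List (List Int) :=
  let vertices := triangles
  let alists := (PySem.List.pyRange 0 (vertices.length : Int)).foldl
      (fun acc _ => acc ++ [([] : List Int)]) []
  let alists := (PySem.List.pyRange 0 (vertices.length : Int)).foldl (fun al i =>
      (PySem.List.pyRange (i + 1) (vertices.length : Int)).foldl (fun al j =>
        if shareEdge (PySem.List.pyGetD vertices i []) (PySem.List.pyGetD vertices j []) then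
          ((al.modify i.toNat (fun l => l ++ [j])).modify j.toNat (fun l => l ++ [i]))
        else al) al) alists
  (vertices, alists)

-- ===== PORT B =====
-- 'for idx, t in enumerate(vertices): for v in set(t): incidence.setdefault(v, []).append(idx)'
def incidenceB (vertices : List (List Int)) : PySem.Dict Int (List Int) :=
  (PySem.List.enumerate vertices).foldl (fun d p =>
    (PySem.Set.ofList p.2).foldl (fun d v => d.modify v [] (fun l => l ++ [p.1])) d)
    PySem.Dict.empty

-- 'while bucket: i, bucket = bucket[0], bucket[1:]; for j in bucket: common[(i,j)] = common.get((i,j),0)+1'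
def pairCount (bucket : List Int) (d : PySem.Dict (Int × Int) Int) : PySem.Dict (Int × Int) Int :=
  match bucket with
  | [] => d
  | i :: rest => pairCount rest (rest.foldl (fun d j => d.insert (i, j) (d.getD (i, j) 0 + 1)) d)

def createTriangleGraph_alt (triangles : List (List Int)) : List (List Int) × List (List Int) :=
  let vertices := triangles
  let incidence := incidenceB vertices
  let common := incidence.values.foldl (fun d bucket => pairCount bucket d) PySem.Dict.empty
  let alists := vertices.map (fun _ => ([] : List Int))
  let alists := common.items.foldl (fun al p =>
      if p.2 == 2 then
        ((al.modify p.1.1.toNat (fun l => l ++ [p.1.2])).modify p.1.2.toNat (fun l => l ++ [p.1.1]))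
      else al) alists
  (vertices, alists.map (fun l => PySem.List.sorted l (fun x => x)))

-- ===== PRECONDITION & SPEC =====
def Spec_createTriangleGraph (triangles : List (List Int)) (out : List (List Int) × List (List Int)) : Prop := out = createTriangleGraph_alt triangles
instance (triangles : List (List Int)) (out : List (List Int) × List (List Int)) : Decidable (Spec_createTriangleGraph triangles out) := by unfold Spec_createTriangleGraph; infer_instance

-- ===== CLAIM (what is proved, stated in full; the proofs are below) =====
def Claim_equal_createTriangleGraph : Prop := ∀ (triangles : List (List Int)), Dom_createTriangleGraph triangles → Spec_createTriangleGraph triangles (createTriangleGraph triangles)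

-- ===== LEMMAS AND PROOFS =====

-- Nat-level views of the data both ports compute with
def tgS (ts : List (List Int)) (a : Nat) : PySem.Set Int := PySem.Set.ofList (ts.getD a [])

def tgSh (ts : List (List Int)) (a b : Nat) : Bool := shareEdge (ts.getD a []) (ts.getD b [])

-- the adjacency list of triangle k that both programs produce: ascending neighbour indices
def tgNbrs (ts : List (List Int)) (k : Nat) : List Int :=
  ((List.range ts.length).filter (fun j => decide (j ≠ k) && tgSh ts k j)).map (fun j : Nat => (j : Int))

-- 'alists[i].append(x)' as a single operation
def tgApp (al : List (List Int)) (p : Int × Int) : List (List Int) :=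
  al.modify p.1.toNat (fun l => l ++ [p.2])

def tgPairsA (n : Int) : List (Int × Int) :=
  (PySem.List.pyRange 0 n).flatMap (fun i => (PySem.List.pyRange (i + 1) n).map (fun j => (i, j)))

def tgOpsIf (ts : List (List Int)) (p : Int × Int) : List (Int × Int) :=
  if shareEdge (PySem.List.pyGetD ts p.1 []) (PySem.List.pyGetD ts p.2 []) then
    [(p.1, p.2), (p.2, p.1)] else []

def tgOpsIf2 (p : (Int × Int) × Int) : List (Int × Int) :=
  if p.2 == 2 then [(p.1.1, p.1.2), (p.1.2, p.1.1)] else []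

-- 'bucket' of a vertex: indices of the triangles containing it, ascending
def tgBucket (ts : List (List Int)) (v : Int) : List Int :=
  ((List.range ts.length).filter (fun i => PySem.Set.contains (tgS ts i) v)).map (fun i : Nat => (i : Int))

def tailsPairs : List Int → List (Int × Int)
  | [] => []
  | x :: r => (r.map (fun y => (x, y))) ++ tailsPairs r

-- ---------- generic list facts ----------

lemma tg_flatMap_ite_singleton {α β : Type} (l : List α) (p : α → Bool) (f : α → β) :
    l.flatMap (fun x => if p x then [f x] else []) = (l.filter p).map f := by
  induction l with
  | nil => rfl
  | cons x l ih => by_cases h : p x <;> simp [h, ih]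

lemma tg_flatMap_ite_mem {α β : Type} [DecidableEq α] (l : List α) (hl : l.Nodup) (t : α)
    (w : List β) : l.flatMap (fun x => if x = t then w else []) = if t ∈ l then w else [] := by
  induction l with
  | nil => simp
  | cons x l ih =>
    rcases List.nodup_cons.mp hl with ⟨hx, hl'⟩
    by_cases h : x = t
    · subst h
      simp [hx, ih hl']
    · have h' : ¬ t = x := fun he => h he.symm
      simp [h, h', ih hl', List.mem_cons]

lemma tg_flatMap_congr {α β : Type} (l : List α) (f g : α → List β)
    (h : ∀ x ∈ l, f x = g x) : l.flatMap f = l.flatMap g := by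
  induction l with
  | nil => rfl
  | cons x l ih =>
    simp only [List.flatMap_cons]
    rw [h x (List.mem_cons_self), ih (fun y hy => h y (List.mem_cons_of_mem _ hy))]

lemma tg_count_nodup {α : Type} [DecidableEq α] (l : List α) (hl : l.Nodup) (a : α) :
    l.count a = if a ∈ l then 1 else 0 := by
  by_cases h : a ∈ l
  · simp [h, List.count_eq_one_of_mem hl h]
  · simp [h, List.count_eq_zero_of_not_mem h]

-- ---------- the append-loop lemma shared by both ports ----------

lemma tgApp_foldl_length (ops : List (Int × Int)) (al : List (List Int)) :
    (ops.foldl tgApp al).length = al.length := by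
  induction ops generalizing al with
  | nil => rfl
  | cons p ops ih => simp [List.foldl_cons, ih, tgApp, List.length_modify]

lemma tgApp_foldl_getElem? (ops : List (Int × Int)) (al : List (List Int)) (k : Nat)
    (h : ∀ p ∈ ops, 0 ≤ p.1) :
    (ops.foldl tgApp al)[k]? =
      al[k]?.map (fun l => l ++ (ops.filter (fun p => p.1 == (k : Int))).map (·.2)) := by
  induction ops generalizing al with
  | nil => simp
  | cons p ops ih =>
    have h0 : 0 ≤ p.1 := h p List.mem_cons_self
    simp only [List.foldl_cons, List.filter_cons]
    rw [ih _ (fun q hq => h q (List.mem_cons_of_mem _ hq))]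
    by_cases hpk : p.1 == (k : Int)
    · have hp1 : p.1 = (k : Int) := by exact_mod_cast (beq_iff_eq.mp hpk)
      have htn : p.1.toNat = k := by omega
      simp only [hpk, tgApp, htn, List.getElem?_modify]
      cases al[k]? <;> simp
    · have hne : p.1.toNat ≠ k := by
        intro he
        apply hpk
        have : p.1 = (k : Int) := by omega
        simp [this]
      simp only [hpk, tgApp, List.getElem?_modify, if_neg hne]
      cases al[k]? <;> simp

lemma tg_foldl_ops {α : Type} (l : List α) (g : α → List (Int × Int))
    (al : List (List Int)) :
    l.foldl (fun al p => (g p).foldl tgApp al) al = (l.flatMap g).foldl tgApp al :=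
  (List.foldl_flatMap).symm

-- ---------- pyRange over casts ----------

lemma tg_pyRange_natCast (a b : Nat) :
    PySem.List.pyRange (a : Int) (b : Int) = (List.range' a (b - a)).map (fun k : Nat => (k : Int)) := by
  induction hf : b - a generalizing a with
  | zero =>
    have hba : ¬ ((a : Int) < (b : Int)) := by omega
    have : PySem.List.pyRange (a : Int) (b : Int) = [] := by
      apply List.eq_nil_iff_forall_not_mem.mpr
      intro x hx
      rw [PySem.List.mem_pyRange_one] at hx
      omega
    simp [this]
  | succ m ih =>
    have hab : (a : Int) < (b : Int) := by omega
    rw [PySem.List.pyRange_one_cons hab]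
    have : (a : Int) + 1 = ((a + 1 : Nat) : Int) := by push_cast; ring
    rw [this, ih (a + 1) (by omega), List.range'_succ]
    simp

-- ---------- symmetry of shareEdge ----------

lemma tg_inter_length_comm (s t : List Int) :
    (PySem.Set.inter (PySem.Set.ofList s) (PySem.Set.ofList t)).length =
    (PySem.Set.inter (PySem.Set.ofList t) (PySem.Set.ofList s)).length := by
  apply List.Perm.length_eq
  rw [List.perm_ext_iff_of_nodup
    (PySem.Set.nodup_inter _ _ (PySem.Set.nodup_ofList s))
    (PySem.Set.nodup_inter _ _ (PySem.Set.nodup_ofList t))]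
  intro x
  rw [PySem.Set.mem_inter, PySem.Set.mem_inter]
  tauto

lemma tg_shareEdge_comm (s t : List Int) : shareEdge s t = shareEdge t s := by
  simp only [shareEdge, PySem.Set.len]
  rw [tg_inter_length_comm]

lemma tgSh_comm (ts : List (List Int)) (a b : Nat) : tgSh ts a b = tgSh ts b a := by
  simp [tgSh, tg_shareEdge_comm]

lemma tgSh_iff (ts : List (List Int)) (a b : Nat) :
    tgSh ts a b = true ↔ (PySem.Set.inter (tgS ts a) (tgS ts b)).length = 2 := by
  simp only [tgSh, shareEdge, PySem.Set.len, tgS, beq_iff_eq]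
  constructor
  · intro h; exact_mod_cast h
  · intro h; exact_mod_cast h

lemma tg_nbrs_pairwise (ts : List (List Int)) (k : Nat) :
    (tgNbrs ts k).Pairwise (· < ·) := by
  unfold tgNbrs
  rw [List.pairwise_map]
  exact (List.Pairwise.sublist List.filter_sublist List.pairwise_lt_range).imp
    (fun h => by exact_mod_cast h)

lemma tg_nbrs_nodup (ts : List (List Int)) (k : Nat) : (tgNbrs ts k).Nodup :=
  (tg_nbrs_pairwise ts k).imp ne_of_lt

lemma tg_mem_nbrs (ts : List (List Int)) (k : Nat) (x : Int) :
    x ∈ tgNbrs ts k ↔ ∃ j : Nat, j < ts.length ∧ j ≠ k ∧ tgSh ts k j = true ∧ x = (j : Int) := by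
  unfold tgNbrs
  simp only [List.mem_map, List.mem_filter, List.mem_range, Bool.and_eq_true, decide_eq_true_eq]
  constructor
  · rintro ⟨j, ⟨hj, hjk, hsh⟩, rfl⟩; exact ⟨j, hj, hjk, hsh, rfl⟩
  · rintro ⟨j, hj, hjk, hsh, rfl⟩; exact ⟨j, ⟨hj, hjk, hsh⟩, rfl⟩

-- ---------- A-side combinatorics ----------

-- contribution of one candidate pair to alists[k]
def tgCK (ts : List (List Int)) (k : Int) (p : Int × Int) : List Int :=
  if shareEdge (PySem.List.pyGetD ts p.1 []) (PySem.List.pyGetD ts p.2 []) then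
    ((if p.1 == k then [p.2] else []) ++ (if p.2 == k then [p.1] else [])) else []

lemma tgOpsIf_filter_map (ts : List (List Int)) (k : Int) (p : Int × Int) :
    ((tgOpsIf ts p).filter (fun q => q.1 == k)).map (·.2) = tgCK ts k p := by
  unfold tgOpsIf tgCK
  by_cases hs : shareEdge (PySem.List.pyGetD ts p.1 []) (PySem.List.pyGetD ts p.2 []) <;>
    by_cases h1 : p.1 == k <;> by_cases h2 : p.2 == k <;>
      simp [hs, h1, h2]

lemma tg_ck_inner (ts : List (List Int)) (k a : Nat) :
    (((PySem.List.pyRange ((a : Int) + 1) (ts.length : Int)).map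
        (fun j => ((a : Int), j))).flatMap (tgCK ts (k : Int)))
    = (List.range' (a + 1) (ts.length - (a + 1))).flatMap
        (fun b : Nat => tgCK ts (k : Int) ((a : Int), (b : Int))) := by
  rw [show ((a : Int) + 1) = (((a + 1 : Nat)) : Int) by push_cast; ring,
    tg_pyRange_natCast (a + 1) ts.length, List.map_map, List.flatMap_map]
  rfl

lemma tg_ck_at (ts : List (List Int)) (k a b : Nat) (hak : a ≠ k) (hbk : b ≠ k) :
    tgCK ts (k : Int) ((a : Int), (b : Int)) = [] := by
  have ha_ne : (((a : Int)) == ((k : Int))) = false := by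
    rw [beq_eq_false_iff_ne]; intro h; exact hak (by exact_mod_cast h)
  have hb_ne : (((b : Int)) == ((k : Int))) = false := by
    rw [beq_eq_false_iff_ne]; intro h; exact hbk (by exact_mod_cast h)
  simp [tgCK, ha_ne, hb_ne]

lemma tg_ck_fst (ts : List (List Int)) (k b : Nat) (hbk : b ≠ k) :
    tgCK ts (k : Int) ((k : Int), (b : Int)) =
      (if tgSh ts k b then [(b : Int)] else []) := by
  have hb_ne : (((b : Int)) == ((k : Int))) = false := by
    rw [beq_eq_false_iff_ne]; intro h; exact hbk (by exact_mod_cast h)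
  simp [tgCK, hb_ne, tgSh, PySem.List.pyGetD_natCast]

lemma tg_ck_snd (ts : List (List Int)) (k a : Nat) (hak : a ≠ k) :
    tgCK ts (k : Int) ((a : Int), (k : Int)) =
      (if tgSh ts a k then [(a : Int)] else []) := by
  have ha_ne : (((a : Int)) == ((k : Int))) = false := by
    rw [beq_eq_false_iff_ne]; intro h; exact hak (by exact_mod_cast h)
  simp [tgCK, ha_ne, tgSh, PySem.List.pyGetD_natCast]

lemma tg_range_split (n k : Nat) (hk : k < n) :
    List.range n = List.range' 0 k ++ k :: List.range' (k + 1) (n - (k + 1)) := by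
  have h1 : n - k = (n - (k + 1)) + 1 := by omega
  have h2 : k + (n - k) = n := by omega
  calc List.range n = List.range' 0 (k + (n - k)) := by rw [List.range_eq_range', h2]
    _ = List.range' 0 k ++ List.range' (0 + 1 * k) (n - k) := (List.range'_append).symm
    _ = List.range' 0 k ++ k :: List.range' (k + 1) (n - (k + 1)) := by
        rw [show 0 + 1 * k = k by omega, h1, List.range'_succ]

lemma tg_opsA_filter (ts : List (List Int)) (k : Nat) (hk : k < ts.length) :
    (((tgPairsA ts.length).flatMap (tgOpsIf ts)).filter (fun p => p.1 == (k : Int))).map (·.2) =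
      tgNbrs ts k := by
  rw [List.filter_flatMap, List.map_flatMap,
    tg_flatMap_congr _ _ (tgCK ts (k : Int)) (fun p _ => tgOpsIf_filter_map ts (k : Int) p)]
  unfold tgPairsA
  rw [List.flatMap_assoc, PySem.List.pyRange_zero_natCast, List.flatMap_map]
  have hG : ∀ a ∈ List.range ts.length,
      (((PySem.List.pyRange ((a : Int) + 1) (ts.length : Int)).map
        (fun j => ((a : Int), j))).flatMap (tgCK ts (k : Int)))
      = (List.range' (a + 1) (ts.length - (a + 1))).flatMap
          (fun b : Nat => tgCK ts (k : Int) ((a : Int), (b : Int))) := by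
    intro a ha
    exact tg_ck_inner ts k a
  rw [tg_flatMap_congr _ _ _ hG, tg_range_split ts.length k hk, List.flatMap_append,
    List.flatMap_cons]
  -- the three segments of the outer loop
  have hsegA : (List.range' 0 k).flatMap (fun a =>
      (List.range' (a + 1) (ts.length - (a + 1))).flatMap
        (fun b : Nat => tgCK ts (k : Int) ((a : Int), (b : Int))))
      = ((List.range' 0 k).filter (fun a => tgSh ts a k)).map (fun a : Nat => (a : Int)) := by
    have hpt : ∀ a ∈ List.range' 0 k,
        (List.range' (a + 1) (ts.length - (a + 1))).flatMap
          (fun b : Nat => tgCK ts (k : Int) ((a : Int), (b : Int)))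
        = if tgSh ts a k then [(a : Int)] else [] := by
      intro a ha
      rw [List.mem_range'_1] at ha
      have hak : a ≠ k := by omega
      have hcg : ∀ b ∈ List.range' (a + 1) (ts.length - (a + 1)),
          tgCK ts (k : Int) ((a : Int), (b : Int))
          = if b = k then (if tgSh ts a k then [(a : Int)] else []) else [] := by
        intro b _
        by_cases hbk : b = k
        · subst hbk
          rw [if_pos rfl]
          exact tg_ck_snd ts b a hak
        · rw [if_neg hbk]
          exact tg_ck_at ts k a b hak hbk
      rw [tg_flatMap_congr _ _ _ hcg,
        tg_flatMap_ite_mem _ (List.nodup_range' 1) k _]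
      have hkin : k ∈ List.range' (a + 1) (ts.length - (a + 1)) := by
        rw [List.mem_range'_1]; omega
      rw [if_pos hkin]
    rw [tg_flatMap_congr _ _ _ hpt, tg_flatMap_ite_singleton]
  have hsegB : (List.range' (k + 1) (ts.length - (k + 1))).flatMap
      (fun b : Nat => tgCK ts (k : Int) ((k : Int), (b : Int)))
      = ((List.range' (k + 1) (ts.length - (k + 1))).filter (fun b => tgSh ts k b)).map
          (fun b : Nat => (b : Int)) := by
    have hcg : ∀ b ∈ List.range' (k + 1) (ts.length - (k + 1)),
        tgCK ts (k : Int) ((k : Int), (b : Int)) = if tgSh ts k b then [(b : Int)] else [] := by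
      intro b hb
      rw [List.mem_range'_1] at hb
      exact tg_ck_fst ts k b (by omega)
    rw [tg_flatMap_congr _ _ _ hcg, tg_flatMap_ite_singleton]
  have hsegC : (List.range' (k + 1) (ts.length - (k + 1))).flatMap (fun a =>
      (List.range' (a + 1) (ts.length - (a + 1))).flatMap
        (fun b : Nat => tgCK ts (k : Int) ((a : Int), (b : Int))))
      = [] := by
    have hpt : ∀ a ∈ List.range' (k + 1) (ts.length - (k + 1)),
        (List.range' (a + 1) (ts.length - (a + 1))).flatMap
          (fun b : Nat => tgCK ts (k : Int) ((a : Int), (b : Int))) = [] := by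
      intro a ha
      rw [List.mem_range'_1] at ha
      have hcg : ∀ b ∈ List.range' (a + 1) (ts.length - (a + 1)),
          tgCK ts (k : Int) ((a : Int), (b : Int)) = [] := by
        intro b hb
        rw [List.mem_range'_1] at hb
        exact tg_ck_at ts k a b (by omega) (by omega)
      rw [tg_flatMap_congr _ _ _ hcg]
      simp
    rw [tg_flatMap_congr _ _ _ hpt]
    simp
  rw [hsegA, hsegB, hsegC, List.append_nil]
  -- now the right-hand side
  unfold tgNbrs
  rw [tg_range_split ts.length k hk, List.filter_append, List.filter_cons]
  have hhead : (decide (k ≠ k) && tgSh ts k k) = false := by simp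
  rw [hhead]
  simp only [Bool.false_eq_true, if_false]
  rw [List.map_append]
  congr 1
  · have heq : List.filter (fun a => tgSh ts a k) (List.range' 0 k)
        = List.filter (fun j => decide (j ≠ k) && tgSh ts k j) (List.range' 0 k) := by
      apply List.filter_congr
      intro j hj
      have hjk : j ≠ k := by rw [List.mem_range'_1] at hj; omega
      rw [tgSh_comm ts j k]
      simp [hjk]
    rw [heq]
  · have heq : List.filter (fun b => tgSh ts k b) (List.range' (k + 1) (ts.length - (k + 1)))
        = List.filter (fun j => decide (j ≠ k) && tgSh ts k j)
            (List.range' (k + 1) (ts.length - (k + 1))) := by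
      apply List.filter_congr
      intro j hj
      have hjk : j ≠ k := by rw [List.mem_range'_1] at hj; omega
      simp [hjk]
    rw [heq]

-- ---------- A-side summary ----------

lemma tg_A_snd (ts : List (List Int)) :
    (createTriangleGraph ts).2 = (List.range ts.length).map (tgNbrs ts) := by
  have hinit : (PySem.List.pyRange 0 (ts.length : Int)).foldl
      (fun acc _ => acc ++ [([] : List Int)]) [] = List.replicate ts.length ([] : List Int) := by
    rw [PySem.List.foldl_append_singleton_eq_map, List.nil_append, List.map_const',
      PySem.List.pyRange_zero_natCast, List.length_map, List.length_range]
  have hloop : ∀ al : List (List Int),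
      (PySem.List.pyRange 0 (ts.length : Int)).foldl (fun al i =>
        (PySem.List.pyRange (i + 1) (ts.length : Int)).foldl (fun al j =>
          if shareEdge (PySem.List.pyGetD ts i []) (PySem.List.pyGetD ts j []) then
            ((al.modify i.toNat (fun l => l ++ [j])).modify j.toNat (fun l => l ++ [i]))
          else al) al) al
      = ((tgPairsA (ts.length : Int)).flatMap (tgOpsIf ts)).foldl tgApp al := by
    intro al
    rw [← tg_foldl_ops]
    unfold tgPairsA
    rw [List.foldl_flatMap]
    apply PySem.List.foldl_congr_mem
    intro acc i _
    rw [List.foldl_map]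
    apply PySem.List.foldl_congr_mem
    intro acc2 j _
    show (if shareEdge _ _ then _ else _) = (tgOpsIf ts (i, j)).foldl tgApp acc2
    unfold tgOpsIf
    split
    · rfl
    · rfl
  have hA : createTriangleGraph ts =
      (ts, ((tgPairsA (ts.length : Int)).flatMap (tgOpsIf ts)).foldl tgApp
        (List.replicate ts.length [])) := by
    simp only [createTriangleGraph]
    rw [hinit, hloop]
  rw [hA]
  have hnonneg : ∀ p ∈ (tgPairsA (ts.length : Int)).flatMap (tgOpsIf ts), 0 ≤ p.1 := by
    intro p hp
    rw [List.mem_flatMap] at hp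
    obtain ⟨q, hq, hpq⟩ := hp
    unfold tgPairsA at hq
    rw [List.mem_flatMap] at hq
    obtain ⟨i, hi, hq2⟩ := hq
    rw [List.mem_map] at hq2
    obtain ⟨j, hj, rfl⟩ := hq2
    have hi0 : 0 ≤ i := ((PySem.List.mem_pyRange_one).mp hi).1
    have hj0 : 0 ≤ j := by
      have := ((PySem.List.mem_pyRange_one).mp hj).1
      omega
    unfold tgOpsIf at hpq
    split at hpq
    · rcases List.mem_cons.mp hpq with rfl | hpq
      · exact hi0
      · rcases List.mem_cons.mp hpq with rfl | hpq
        · exact hj0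
        · exact absurd hpq (List.not_mem_nil)
    · exact absurd hpq (List.not_mem_nil)
  apply List.ext_getElem?
  intro i
  by_cases hi : i < ts.length
  · rw [tgApp_foldl_getElem? _ _ _ hnonneg, List.getElem?_replicate, if_pos hi,
      List.getElem?_map, List.getElem?_range hi]
    simp only [Option.map_some, List.nil_append]
    rw [tg_opsA_filter ts i hi]
  · have h1 : ((((tgPairsA (ts.length : Int)).flatMap (tgOpsIf ts)).foldl tgApp
        (List.replicate ts.length ([] : List Int))))[i]? = none :=
      List.getElem?_eq_none (by rw [tgApp_foldl_length, List.length_replicate]; omega)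
    have h2 : (((List.range ts.length).map (tgNbrs ts)))[i]? = none :=
      List.getElem?_eq_none (by rw [List.length_map, List.length_range]; omega)
    rw [h1, h2]

-- ---------- B-side: incidence ------------ ---------- B-side: incidence ----------

lemma tg_filter_pair_map (S : List Int) (hS : S.Nodup) (c v : Int) :
    (((S.map (fun u => (u, c))).filter (fun q => q.1 == v)).map (·.2)) =
      if v ∈ S then [c] else [] := by
  induction S with
  | nil => simp
  | cons u S ih =>
    rcases List.nodup_cons.mp hS with ⟨hu, hS'⟩
    by_cases h : u = v
    · subst h
      simp [ih hS', hu]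
    · have h' : ¬ v = u := fun he => h he.symm
      simp [h, h', ih hS']

lemma tg_incLoop_getD (E : List (Int × List Int)) (d : PySem.Dict Int (List Int)) (v : Int) :
    (E.foldl (fun d p =>
        (PySem.Set.ofList p.2).foldl (fun d u => d.modify u [] (fun l => l ++ [p.1])) d) d).getD v []
      = d.getD v [] ++
        (E.filter (fun p => PySem.Set.contains (PySem.Set.ofList p.2) v)).map (·.1) := by
  induction E generalizing d with
  | nil => simp
  | cons p E ih =>
    simp only [List.foldl_cons, List.filter_cons]
    rw [ih]
    have hinner : ((PySem.Set.ofList p.2).foldl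
        (fun d u => d.modify u [] (fun l => l ++ [p.1])) d).getD v []
        = d.getD v [] ++ (if v ∈ PySem.Set.ofList p.2 then [p.1] else []) := by
      have : (PySem.Set.ofList p.2).foldl (fun d u => d.modify u [] (fun l => l ++ [p.1])) d
          = ((PySem.Set.ofList p.2).map (fun u => (u, p.1))).foldl
              (fun d q => d.modify q.1 [] (fun l => l ++ [q.2])) d := by
        rw [List.foldl_map]
      rw [this, PySem.Dict.getD_foldl_modify_append,
        tg_filter_pair_map _ (PySem.Set.nodup_ofList p.2)]
    rw [hinner]
    by_cases hv : PySem.Set.contains (PySem.Set.ofList p.2) v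
    · have hvm : v ∈ PySem.Set.ofList p.2 := (PySem.Set.contains_iff _ _).mp hv
      simp [hvm]
    · have hvm : v ∉ PySem.Set.ofList p.2 := fun hm => hv ((PySem.Set.contains_iff _ _).mpr hm)
      simp [hvm]

lemma tg_enumerate_eq (xs : List (List Int)) (s : Int) :
    PySem.List.enumerate xs s =
      (List.range xs.length).map (fun i : Nat => (s + (i : Int), xs.getD i [])) := by
  induction xs generalizing s with
  | nil => simp [PySem.List.enumerate]
  | cons x xs ih =>
    rw [show PySem.List.enumerate (x :: xs) s = (s, x) :: PySem.List.enumerate xs (s + 1) from rfl,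
      ih (s + 1)]
    simp only [List.length_cons, List.range_succ_eq_map, List.map_cons, List.map_map]
    congr 1
    · simp
    · apply List.map_congr_left
      intro i _
      simp only [Function.comp_apply, Nat.succ_eq_add_one, List.getD_cons_succ, Prod.mk.injEq,
        and_true]
      push_cast
      ring

lemma tg_inc_getD (ts : List (List Int)) (v : Int) :
    (incidenceB ts).getD v [] = tgBucket ts v := by
  unfold incidenceB tgBucket
  rw [tg_incLoop_getD, PySem.Dict.getD_empty, List.nil_append, tg_enumerate_eq]
  rw [List.filter_map, List.map_map]
  have hf : ∀ i ∈ List.range ts.length,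
      ((fun p => PySem.Set.contains (PySem.Set.ofList p.2) v) ∘
        (fun i : Nat => ((0 : Int) + (i : Int), ts.getD i []))) i
      = (fun i => PySem.Set.contains (tgS ts i) v) i := by
    intro i _; simp [tgS]
  rw [List.filter_congr hf]
  apply List.map_congr_left
  intro i _
  simp

lemma tg_inc_keys_nodup (ts : List (List Int)) : (incidenceB ts).keys.Nodup := by
  unfold incidenceB
  generalize (PySem.List.enumerate ts 0) = E
  have : ∀ (E : List (Int × List Int)) (d : PySem.Dict Int (List Int)), d.keys.Nodup →
      (E.foldl (fun d p =>
        (PySem.Set.ofList p.2).foldl (fun d u => d.modify u [] (fun l => l ++ [p.1])) d) d).keys.Nodup := by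
    intro E
    induction E with
    | nil => intro d hd; exact hd
    | cons p E ih =>
      intro d hd
      apply ih
      exact PySem.Dict.nodup_keys_foldl_modify_key (PySem.Set.ofList p.2) (fun u => u) []
        (fun _ _ => (fun l => l ++ [p.1])) d hd
  exact this E PySem.Dict.empty (by simp [PySem.Dict.keys_empty])

lemma tg_inc_keys_mem (ts : List (List Int)) (v : Int) :
    v ∈ (incidenceB ts).keys ↔ ∃ i, i < ts.length ∧ v ∈ tgS ts i := by
  unfold incidenceB
  have main : ∀ (E : List (Int × List Int)) (d : PySem.Dict Int (List Int)) (u : Int),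
      (u ∈ (E.foldl (fun d p =>
        (PySem.Set.ofList p.2).foldl (fun d w => d.modify w [] (fun l => l ++ [p.1])) d) d).keys)
      ↔ u ∈ d.keys ∨ ∃ p ∈ E, u ∈ PySem.Set.ofList p.2 := by
    intro E
    induction E with
    | nil => simp
    | cons p E ih =>
      intro d u
      rw [List.foldl_cons, ih]
      have hkeys : ((PySem.Set.ofList p.2).foldl
          (fun d w => d.modify w [] (fun l => l ++ [p.1])) d).keys
          = PySem.Set.update d.keys ((PySem.Set.ofList p.2).map (fun w => w)) := by
        exact PySem.Dict.keys_foldl_modify_key (PySem.Set.ofList p.2) (fun w => w) []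
          (fun _ _ => (fun l => l ++ [p.1])) d
      rw [hkeys]
      rw [List.map_id']
      constructor
      · rintro (h | h)
        · rcases (PySem.Set.mem_update _ _ _).mp h with h | h
          · exact Or.inl h
          · exact Or.inr ⟨p, List.mem_cons_self, h⟩
        · rcases h with ⟨q, hq, hu⟩
          exact Or.inr ⟨q, List.mem_cons_of_mem _ hq, hu⟩
      · rintro (h | ⟨q, hq, hu⟩)
        · exact Or.inl ((PySem.Set.mem_update _ _ _).mpr (Or.inl h))
        · rcases List.mem_cons.mp hq with rfl | hq
          · exact Or.inl ((PySem.Set.mem_update _ _ _).mpr (Or.inr hu))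
          · exact Or.inr ⟨q, hq, hu⟩
  rw [main, tg_enumerate_eq]
  simp only [PySem.Dict.keys_empty, List.not_mem_nil, false_or, List.mem_map, List.mem_range]
  constructor
  · rintro ⟨p, ⟨i, hi, rfl⟩, hv⟩
    exact ⟨i, hi, hv⟩
  · rintro ⟨i, hi, hv⟩
    exact ⟨((0 : Int) + (i : Int), ts.getD i []), ⟨i, hi, rfl⟩, hv⟩

-- ---------- B-side: buckets ------------ ---------- B-side: buckets ----------

lemma tg_bucket_pairwise (ts : List (List Int)) (v : Int) :
    (tgBucket ts v).Pairwise (· < ·) := by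
  unfold tgBucket
  rw [List.pairwise_map]
  exact (List.Pairwise.sublist List.filter_sublist List.pairwise_lt_range).imp
    (fun h => by exact_mod_cast h)

lemma tg_mem_bucket (ts : List (List Int)) (v x : Int) :
    x ∈ tgBucket ts v ↔ ∃ i : Nat, i < ts.length ∧ x = (i : Int) ∧ v ∈ tgS ts i := by
  unfold tgBucket
  simp [List.mem_filter, List.mem_range]
  constructor
  · rintro ⟨i, ⟨hi, hv⟩, rfl⟩; exact ⟨i, hi, rfl, hv⟩
  · rintro ⟨i, hi, rfl, hv⟩; exact ⟨i, ⟨hi, hv⟩, rfl⟩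

lemma tg_mem_bucket_natCast (ts : List (List Int)) (v : Int) (a : Nat) (ha : a < ts.length) :
    ((a : Int) ∈ tgBucket ts v) ↔ v ∈ tgS ts a := by
  rw [tg_mem_bucket]
  constructor
  · rintro ⟨i, hi, hcast, hv⟩
    have : i = a := by omega
    subst this; exact hv
  · intro hv; exact ⟨a, ha, rfl, hv⟩

-- ---------- B-side: pairCount / tailsPairs ----------

lemma tg_count_tailsPairs (l : List Int) (hl : l.Pairwise (· < ·)) (i j : Int) :
    (tailsPairs l).count (i, j) = if i ∈ l ∧ j ∈ l ∧ i < j then 1 else 0 := by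
  induction l with
  | nil => simp [tailsPairs]
  | cons x r ih =>
    rcases List.pairwise_cons.mp hl with ⟨hx, hr⟩
    have hxr : x ∉ r := fun h => lt_irrefl x (hx x h)
    have hnd : r.Nodup := hr.imp ne_of_lt
    rw [show tailsPairs (x :: r) = (r.map (fun y => (x, y))) ++ tailsPairs r from rfl,
      List.count_append, ih hr]
    by_cases hix : i = x
    · subst hix
      rw [List.count_map_of_injective r (fun y => (i, y)) (fun a b h => by simpa using h) j,
        tg_count_nodup r hnd j]
      rw [if_neg (show ¬ (i ∈ r ∧ j ∈ r ∧ i < j) from fun h => hxr h.1)]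
      by_cases hjr : j ∈ r
      · have hij : i < j := hx j hjr
        rw [if_pos hjr, if_pos ⟨List.mem_cons_self, List.mem_cons_of_mem _ hjr, hij⟩]
      · have hn : ¬ (i ∈ i :: r ∧ j ∈ i :: r ∧ i < j) := by
          rintro ⟨-, hj, hij⟩
          rcases List.mem_cons.mp hj with hj | hj
          · omega
          · exact hjr hj
        rw [if_neg hjr, if_neg hn]
    · have h0 : ((r.map (fun y => (x, y))).count (i, j)) = 0 := by
        apply List.count_eq_zero_of_not_mem
        intro hmem
        rcases List.mem_map.mp hmem with ⟨y, _, heq⟩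
        exact hix (congrArg Prod.fst heq).symm
      rw [h0, Nat.zero_add]
      by_cases h1 : i ∈ r ∧ j ∈ r ∧ i < j
      · rw [if_pos h1,
          if_pos ⟨List.mem_cons_of_mem _ h1.1, List.mem_cons_of_mem _ h1.2.1, h1.2.2⟩]
      · have hn : ¬ (i ∈ x :: r ∧ j ∈ x :: r ∧ i < j) := by
          rintro ⟨hi, hj, hij⟩
          rcases List.mem_cons.mp hi with hi | hi
          · exact hix hi
          rcases List.mem_cons.mp hj with hj | hj
          · rw [hj] at hij
            have := hx i hi
            omega
          · exact h1 ⟨hi, hj, hij⟩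
        rw [if_neg h1, if_neg hn]

lemma tg_mem_tailsPairs (l : List Int) (hl : l.Pairwise (· < ·)) (i j : Int) :
    (i, j) ∈ tailsPairs l ↔ i ∈ l ∧ j ∈ l ∧ i < j := by
  rw [← List.count_pos_iff, tg_count_tailsPairs l hl]
  split <;> simp_all

lemma tg_pairCount_getD (l : List Int) (d : PySem.Dict (Int × Int) Int) (key : Int × Int) :
    (pairCount l d).getD key 0 = d.getD key 0 + ((tailsPairs l).count key : Int) := by
  induction l generalizing d with
  | nil => simp [pairCount, tailsPairs]
  | cons x r ih =>
    show (pairCount r _).getD key 0 = _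
    rw [ih]
    have : r.foldl (fun d j => d.insert (x, j) (d.getD (x, j) 0 + 1)) d
        = (r.map (fun j => (x, j))).foldl (fun d q => d.insert q (d.getD q 0 + 1)) d := by
      rw [List.foldl_map]
    rw [this, PySem.Dict.getD_foldl_insert_add_one]
    show _ = d.getD key 0 + ((tailsPairs (x :: r)).count key : Int)
    have : tailsPairs (x :: r) = (r.map (fun y => (x, y))) ++ tailsPairs r := rfl
    rw [this, List.count_append]
    push_cast
    ring

lemma tg_pairCount_keys (l : List Int) (d : PySem.Dict (Int × Int) Int) :
    (pairCount l d).keys = PySem.Set.update d.keys (tailsPairs l) := by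
  induction l generalizing d with
  | nil => simp [pairCount, tailsPairs, PySem.Set.update_nil]
  | cons x r ih =>
    show (pairCount r _).keys = _
    have hmap : r.foldl (fun d j => d.insert (x, j) (d.getD (x, j) 0 + 1)) d
        = (r.map (fun j => (x, j))).foldl (fun d q => d.insert q (d.getD q 0 + 1)) d := by
      rw [List.foldl_map]
    rw [hmap, ih, PySem.Dict.keys_foldl_insert,
      show tailsPairs (x :: r) = (r.map (fun y => (x, y))) ++ tailsPairs r from rfl,
      PySem.Set.update_append]

-- ---------- B-side: the common dict ----------

def tgCommon (ts : List (List Int)) : PySem.Dict (Int × Int) Int :=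
  (incidenceB ts).values.foldl (fun d bucket => pairCount bucket d) PySem.Dict.empty

lemma tg_values_eq (ts : List (List Int)) :
    (incidenceB ts).values = (incidenceB ts).keys.map (tgBucket ts) := by
  have h := PySem.Dict.items_eq_map_keys (incidenceB ts) (tg_inc_keys_nodup ts) []
  show ((incidenceB ts).items).map (·.2) = _
  rw [h, List.map_map]
  apply List.map_congr_left
  intro v _
  simp [tg_inc_getD]

lemma tg_commonLoop_getD (ts : List (List Int)) (vsl : List Int)
    (d : PySem.Dict (Int × Int) Int) (key : Int × Int) :
    (vsl.foldl (fun d v => pairCount (tgBucket ts v) d) d).getD key 0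
      = d.getD key 0 + ((vsl.map (fun v => ((tailsPairs (tgBucket ts v)).count key : Int))).sum) := by
  induction vsl generalizing d with
  | nil => simp
  | cons v vsl ih =>
    simp only [List.foldl_cons, List.map_cons, List.sum_cons]
    rw [ih, tg_pairCount_getD]
    ring

lemma tg_commonLoop_keys (ts : List (List Int)) (vsl : List Int)
    (d : PySem.Dict (Int × Int) Int) :
    (vsl.foldl (fun d v => pairCount (tgBucket ts v) d) d).keys
      = PySem.Set.update d.keys (vsl.flatMap (fun v => tailsPairs (tgBucket ts v))) := by
  induction vsl generalizing d with
  | nil => simp [PySem.Set.update_nil]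
  | cons v vsl ih =>
    rw [List.foldl_cons, ih, tg_pairCount_keys, List.flatMap_cons, PySem.Set.update_append]

lemma tg_common_keys_eq (ts : List (List Int)) :
    (tgCommon ts).keys = PySem.Set.ofList
      ((incidenceB ts).keys.flatMap (fun v => tailsPairs (tgBucket ts v))) := by
  unfold tgCommon
  rw [tg_values_eq, List.foldl_map, tg_commonLoop_keys, PySem.Dict.keys_empty,
    PySem.Set.update_nil_left]

lemma tg_common_getD (ts : List (List Int)) (key : Int × Int) :
    (tgCommon ts).getD key 0 =
      (((incidenceB ts).keys.countP
        (fun v => decide (key.1 ∈ tgBucket ts v) && decide (key.2 ∈ tgBucket ts v)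
          && decide (key.1 < key.2)) : Nat) : Int) := by
  unfold tgCommon
  rw [tg_values_eq, List.foldl_map, tg_commonLoop_getD, PySem.Dict.getD_empty, zero_add]
  have hcongr : ∀ v ∈ (incidenceB ts).keys,
      (((tailsPairs (tgBucket ts v)).count key : Nat) : Int)
      = if (decide (key.1 ∈ tgBucket ts v) && decide (key.2 ∈ tgBucket ts v)
          && decide (key.1 < key.2)) then (1 : Int) else 0 := by
    intro v _
    have := tg_count_tailsPairs (tgBucket ts v) (tg_bucket_pairwise ts v) key.1 key.2
    rw [Prod.mk.eta] at this
    rw [this]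
    by_cases h1 : key.1 ∈ tgBucket ts v <;> by_cases h2 : key.2 ∈ tgBucket ts v <;>
      by_cases h3 : key.1 < key.2 <;> simp [h1, h2, h3]
  rw [List.map_congr_left hcongr, PySem.List.sum_map_ite_one_zero]

lemma tg_common_keys_nodup (ts : List (List Int)) : (tgCommon ts).keys.Nodup := by
  rw [tg_common_keys_eq]
  exact PySem.Set.nodup_ofList _

lemma tg_common_keys_mem (ts : List (List Int)) (key : Int × Int) :
    key ∈ (tgCommon ts).keys ↔
      ∃ v ∈ (incidenceB ts).keys, key ∈ tailsPairs (tgBucket ts v) := by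
  rw [tg_common_keys_eq, PySem.Set.mem_ofList, List.mem_flatMap]

lemma tg_common_key_shape (ts : List (List Int)) (key : Int × Int)
    (h : key ∈ (tgCommon ts).keys) :
    ∃ a b : Nat, key = ((a : Int), (b : Int)) ∧ a < b ∧ a < ts.length ∧ b < ts.length := by
  obtain ⟨v, _, hkey⟩ := (tg_common_keys_mem ts key).mp h
  obtain ⟨k1, k2⟩ := key
  obtain ⟨h1, h2, hlt⟩ := (tg_mem_tailsPairs _ (tg_bucket_pairwise ts v) k1 k2).mp hkey
  obtain ⟨a, ha, rfl, -⟩ := (tg_mem_bucket ts v k1).mp h1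
  obtain ⟨b, hb, rfl, -⟩ := (tg_mem_bucket ts v k2).mp h2
  exact ⟨a, b, rfl, by exact_mod_cast hlt, ha, hb⟩

lemma tg_common_getD_nat (ts : List (List Int)) (a b : Nat) (ha : a < ts.length)
    (hb : b < ts.length) (hab : a < b) :
    (tgCommon ts).getD ((a : Int), (b : Int)) 0 =
      ((PySem.Set.inter (tgS ts a) (tgS ts b)).length : Int) := by
  rw [tg_common_getD]
  have hcongr : ∀ v ∈ (incidenceB ts).keys,
      (decide (((a : Int), (b : Int)).1 ∈ tgBucket ts v)
        && decide (((a : Int), (b : Int)).2 ∈ tgBucket ts v)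
        && decide (((a : Int), (b : Int)).1 < ((a : Int), (b : Int)).2))
      = (PySem.Set.contains (tgS ts a) v && PySem.Set.contains (tgS ts b) v) := by
    intro v _
    have h1 : ((a : Int) ∈ tgBucket ts v) ↔ v ∈ tgS ts a := tg_mem_bucket_natCast ts v a ha
    have h2 : ((b : Int) ∈ tgBucket ts v) ↔ v ∈ tgS ts b := tg_mem_bucket_natCast ts v b hb
    have h3 : ((a : Int) < (b : Int)) := by exact_mod_cast hab
    simp [h1, h2, h3]
  rw [List.countP_congr (fun v hv => by rw [hcongr v hv])]
  congr 1
  rw [List.countP_eq_length_filter]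
  apply List.Perm.length_eq
  rw [List.perm_ext_iff_of_nodup
    (List.Nodup.filter _ (tg_inc_keys_nodup ts))
    (PySem.Set.nodup_inter (tgS ts a) (tgS ts b) (PySem.Set.nodup_ofList _))]
  intro v
  rw [List.mem_filter, PySem.Set.mem_inter, Bool.and_eq_true,
    PySem.Set.contains_iff, PySem.Set.contains_iff]
  constructor
  · rintro ⟨-, hva, hvb⟩; exact ⟨hva, hvb⟩
  · rintro ⟨hva, hvb⟩
    exact ⟨(tg_inc_keys_mem ts v).mpr ⟨a, ha, hva⟩, hva, hvb⟩

lemma tg_common_keys_natCast (ts : List (List Int)) (a b : Nat) (ha : a < ts.length)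
    (hb : b < ts.length) (hab : a < b) :
    (((a : Int), (b : Int)) ∈ (tgCommon ts).keys) ↔
      PySem.Set.inter (tgS ts a) (tgS ts b) ≠ [] := by
  rw [tg_common_keys_mem]
  constructor
  · rintro ⟨v, -, hkey⟩
    obtain ⟨h1, h2, -⟩ := (tg_mem_tailsPairs _ (tg_bucket_pairwise ts v) _ _).mp hkey
    have hva := (tg_mem_bucket_natCast ts v a ha).mp h1
    have hvb := (tg_mem_bucket_natCast ts v b hb).mp h2
    have hv : v ∈ PySem.Set.inter (tgS ts a) (tgS ts b) :=
      (PySem.Set.mem_inter _ _ _).mpr ⟨hva, hvb⟩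
    intro heq
    rw [heq] at hv
    exact List.not_mem_nil hv
  · intro hne
    obtain ⟨v, hv⟩ := List.exists_mem_of_ne_nil _ hne
    obtain ⟨hva, hvb⟩ := (PySem.Set.mem_inter _ _ _).mp hv
    refine ⟨v, (tg_inc_keys_mem ts v).mpr ⟨a, ha, hva⟩,
      (tg_mem_tailsPairs _ (tg_bucket_pairwise ts v) _ _).mpr
        ⟨(tg_mem_bucket_natCast ts v a ha).mpr hva,
         (tg_mem_bucket_natCast ts v b hb).mpr hvb, by exact_mod_cast hab⟩⟩

-- ---------- B-side: assembling the adjacency lists ----------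

lemma tg_keys_flatMap_eq (l : List (Int × Int)) (hlt : ∀ q ∈ l, q.1 < q.2)
    (c : Int × Int → Int) (k : Int) :
    l.flatMap (fun q => if c q == 2 then
        ((if q.1 == k then [q.2] else []) ++ (if q.2 == k then [q.1] else [])) else [])
      = (l.filter (fun q => c q == 2 && (q.1 == k || q.2 == k))).map
          (fun q => if q.1 == k then q.2 else q.1) := by
  induction l with
  | nil => simp
  | cons q l ih =>
    have hq : q.1 < q.2 := hlt q List.mem_cons_self
    have hrest := ih (fun p hp => hlt p (List.mem_cons_of_mem _ hp))
    simp only [List.flatMap_cons, List.filter_cons, hrest]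
    by_cases hc : (c q == 2) = true
    · by_cases h1 : (q.1 == k) = true
      · have h2 : ¬ ((q.2 == k) = true) := by rw [beq_iff_eq] at h1 ⊢; omega
        have hcond : (c q == 2 && (q.1 == k || q.2 == k)) = true := by simp [hc, h1]
        rw [if_pos hc, if_pos h1, if_neg h2, if_pos hcond, List.map_cons, if_pos h1]
        simp
      · by_cases h2 : (q.2 == k) = true
        · have hcond : (c q == 2 && (q.1 == k || q.2 == k)) = true := by simp [hc, h2]
          rw [if_pos hc, if_neg h1, if_pos h2, if_pos hcond, List.map_cons, if_neg h1]
          simp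
        · have hcond : ¬ ((c q == 2 && (q.1 == k || q.2 == k)) = true) := by simp [h1, h2]
          rw [if_pos hc, if_neg h1, if_neg h2, if_neg hcond]
          simp
    · have hcond : ¬ ((c q == 2 && (q.1 == k || q.2 == k)) = true) := by simp [hc]
      rw [if_neg hc, if_neg hcond]
      simp

lemma tgOpsIf2_filter_map (k : Int) (p : (Int × Int) × Int) :
    ((tgOpsIf2 p).filter (fun q => q.1 == k)).map (·.2) =
      if p.2 == 2 then
        ((if p.1.1 == k then [p.1.2] else []) ++ (if p.1.2 == k then [p.1.1] else [])) else [] := by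
  unfold tgOpsIf2
  by_cases hc : (p.2 == 2) = true <;> by_cases h1 : (p.1.1 == k) = true <;>
    by_cases h2 : (p.1.2 == k) = true <;> simp [hc, h1, h2]

lemma tg_common_fst_lt (ts : List (List Int)) :
    ∀ q ∈ (tgCommon ts).keys, q.1 < q.2 := by
  intro q hq
  obtain ⟨a, b, rfl, hab, -, -⟩ := tg_common_key_shape ts q hq
  show ((a : Int)) < ((b : Int))
  exact_mod_cast hab

def tgPB (ts : List (List Int)) (k : Nat) : List Int :=
  ((tgCommon ts).keys.filter (fun q => (tgCommon ts).getD q 0 == 2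
      && (q.1 == (k : Int) || q.2 == (k : Int)))).map
    (fun q => if q.1 == (k : Int) then q.2 else q.1)

lemma tg_opsB_filter (ts : List (List Int)) (k : Nat) :
    ((((tgCommon ts).items.flatMap tgOpsIf2).filter (fun p => p.1 == (k : Int))).map (·.2))
      = tgPB ts k := by
  rw [List.filter_flatMap, List.map_flatMap,
    tg_flatMap_congr _ _ _ (fun p _ => tgOpsIf2_filter_map (k : Int) p),
    PySem.Dict.items_eq_map_keys _ (tg_common_keys_nodup ts) 0, List.flatMap_map]
  exact tg_keys_flatMap_eq _ (tg_common_fst_lt ts) (fun q => (tgCommon ts).getD q 0) (k : Int)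

lemma tg_getD_two_iff (ts : List (List Int)) (a b : Nat) (ha : a < ts.length)
    (hb : b < ts.length) (hab : a < b) :
    ((tgCommon ts).getD ((a : Int), (b : Int)) 0 == 2) = tgSh ts a b := by
  rw [tg_common_getD_nat ts a b ha hb hab]
  by_cases h : (PySem.Set.inter (tgS ts a) (tgS ts b)).length = 2
  · rw [(tgSh_iff ts a b).mpr h]
    simp [h]
  · have : tgSh ts a b ≠ true := fun hc => h ((tgSh_iff ts a b).mp hc)
    simp only [Bool.not_eq_true] at this
    rw [this]
    simp
    omega

lemma tg_mem_pB (ts : List (List Int)) (k : Nat) (hk : k < ts.length) (x : Int) :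
    x ∈ tgPB ts k ↔ x ∈ tgNbrs ts k := by
  unfold tgPB
  rw [List.mem_map, tg_mem_nbrs]
  constructor
  · rintro ⟨q, hq, rfl⟩
    rw [List.mem_filter] at hq
    obtain ⟨hqk, hcond⟩ := hq
    obtain ⟨a, b, rfl, hab, ha, hb⟩ := tg_common_key_shape ts _ hqk
    rw [Bool.and_eq_true, Bool.or_eq_true] at hcond
    obtain ⟨hc2, hside⟩ := hcond
    rcases hside with h1 | h2
    · have h1' : ((a : Int)) = ((k : Int)) := beq_iff_eq.mp h1
      have hak : a = k := by exact_mod_cast h1'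
      subst hak
      have hsh : tgSh ts a b = true := by
        rw [← tg_getD_two_iff ts a b ha hb hab]; exact hc2
      refine ⟨b, hb, by omega, hsh, ?_⟩
      simp
    · have h2' : ((b : Int)) = ((k : Int)) := beq_iff_eq.mp h2
      have hbk : b = k := by exact_mod_cast h2'
      subst hbk
      have h1 : ((a : Int) == (b : Int)) = false := by
        rw [beq_eq_false_iff_ne]
        intro h
        have : a = b := by exact_mod_cast h
        omega
      have hsh : tgSh ts a b = true := by
        rw [← tg_getD_two_iff ts a b ha hb hab]; exact hc2
      refine ⟨a, ha, by omega, by rw [tgSh_comm]; exact hsh, ?_⟩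
      simp [h1]
  · rintro ⟨j, hj, hjk, hsh, rfl⟩
    have hinter : PySem.Set.inter (tgS ts k) (tgS ts j) ≠ [] := by
      intro hnil
      have := (tgSh_iff ts k j).mp hsh
      rw [hnil] at this
      simp at this
    rcases Nat.lt_or_ge j k with hlt | hge
    · refine ⟨((j : Int), (k : Int)), ?_, ?_⟩
      · rw [List.mem_filter]
        constructor
        · exact (tg_common_keys_natCast ts j k hj hk hlt).mpr (by
            intro hnil
            apply hinter
            apply List.eq_nil_iff_forall_not_mem.mpr
            intro v hv
            obtain ⟨hva, hvb⟩ := (PySem.Set.mem_inter _ _ _).mp hv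
            have : v ∈ PySem.Set.inter (tgS ts j) (tgS ts k) :=
              (PySem.Set.mem_inter _ _ _).mpr ⟨hvb, hva⟩
            rw [hnil] at this
            exact List.not_mem_nil this)
        · rw [Bool.and_eq_true, Bool.or_eq_true]
          refine ⟨?_, Or.inr (by simp)⟩
          rw [tg_getD_two_iff ts j k hj hk hlt, tgSh_comm]
          exact hsh
      · have h1 : ((j : Int) == (k : Int)) = false := by
          rw [beq_eq_false_iff_ne]
          intro h
          exact hjk (by exact_mod_cast h)
        simp [h1]
    · have hlt : k < j := by omega
      refine ⟨((k : Int), (j : Int)), ?_, by simp⟩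
      rw [List.mem_filter]
      constructor
      · exact (tg_common_keys_natCast ts k j hk hj hlt).mpr hinter
      · rw [Bool.and_eq_true, Bool.or_eq_true]
        refine ⟨?_, Or.inl (by simp)⟩
        rw [tg_getD_two_iff ts k j hk hj hlt]
        exact hsh

lemma tg_nodup_pB (ts : List (List Int)) (k : Nat) : (tgPB ts k).Nodup := by
  unfold tgPB
  apply List.Nodup.map_on ?_ (List.Nodup.filter _ (tg_common_keys_nodup ts))
  intro q hq q' hq' heq
  rw [List.mem_filter] at hq hq'
  have hqlt : q.1 < q.2 := tg_common_fst_lt ts q hq.1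
  have hq'lt : q'.1 < q'.2 := tg_common_fst_lt ts q' hq'.1
  rw [Bool.and_eq_true, Bool.or_eq_true] at *
  by_cases h1 : (q.1 == (k : Int)) = true <;> by_cases h1' : (q'.1 == (k : Int)) = true
  · rw [if_pos h1, if_pos h1'] at heq
    have e1 : q.1 = (k : Int) := beq_iff_eq.mp h1
    have e2 : q'.1 = (k : Int) := beq_iff_eq.mp h1'
    exact Prod.ext (e1.trans e2.symm) heq
  · rw [if_pos h1, if_neg h1'] at heq
    have h2' : (q'.2 == (k : Int)) = true := by
      rcases hq'.2.2 with h | h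
      · exact absurd h h1'
      · exact h
    have e1 : q.1 = (k : Int) := beq_iff_eq.mp h1
    have e2 : q'.2 = (k : Int) := beq_iff_eq.mp h2'
    omega
  · rw [if_neg h1, if_pos h1'] at heq
    have h2 : (q.2 == (k : Int)) = true := by
      rcases hq.2.2 with h | h
      · exact absurd h h1
      · exact h
    have e1 : q.2 = (k : Int) := beq_iff_eq.mp h2
    have e2 : q'.1 = (k : Int) := beq_iff_eq.mp h1'
    omega
  · rw [if_neg h1, if_neg h1'] at heq
    have h2 : (q.2 == (k : Int)) = true := by
      rcases hq.2.2 with h | h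
      · exact absurd h h1
      · exact h
    have h2' : (q'.2 == (k : Int)) = true := by
      rcases hq'.2.2 with h | h
      · exact absurd h h1'
      · exact h
    have e1 : q.2 = (k : Int) := beq_iff_eq.mp h2
    have e2 : q'.2 = (k : Int) := beq_iff_eq.mp h2'
    exact Prod.ext heq (e1.trans e2.symm)

lemma tg_sorted_pB (ts : List (List Int)) (k : Nat) (hk : k < ts.length) :
    PySem.List.sorted (tgPB ts k) (fun x => x) = tgNbrs ts k := by
  apply PySem.List.sorted_eq_of_perm_of_pairwise_lt
  · rw [List.perm_ext_iff_of_nodup (tg_nbrs_nodup ts k) (tg_nodup_pB ts k)]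
    intro x
    exact (tg_mem_pB ts k hk x).symm
  · exact tg_nbrs_pairwise ts k

lemma tg_B_snd (ts : List (List Int)) :
    (createTriangleGraph_alt ts).2 = (List.range ts.length).map (tgNbrs ts) := by
  have hinit : ts.map (fun _ => ([] : List Int)) = List.replicate ts.length ([] : List Int) :=
    List.map_const'
  have hloop : ∀ al : List (List Int),
      (tgCommon ts).items.foldl (fun al p =>
        if p.2 == 2 then
          ((al.modify p.1.1.toNat (fun l => l ++ [p.1.2])).modify p.1.2.toNat
            (fun l => l ++ [p.1.1]))
        else al) al
      = ((tgCommon ts).items.flatMap tgOpsIf2).foldl tgApp al := by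
    intro al
    rw [← tg_foldl_ops]
    apply PySem.List.foldl_congr_mem
    intro acc p _
    show (if p.2 == 2 then _ else _) = (tgOpsIf2 p).foldl tgApp acc
    unfold tgOpsIf2
    split
    · rfl
    · rfl
  have hB : createTriangleGraph_alt ts =
      (ts, (((tgCommon ts).items.flatMap tgOpsIf2).foldl tgApp
        (List.replicate ts.length [])).map (fun l => PySem.List.sorted l (fun x => x))) := by
    simp only [createTriangleGraph_alt]
    rw [show List.foldl (fun d bucket => pairCount bucket d) PySem.Dict.empty
        (incidenceB ts).values = tgCommon ts from rfl, hinit, hloop]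
  rw [hB]
  have hnonneg : ∀ p ∈ (tgCommon ts).items.flatMap tgOpsIf2, 0 ≤ p.1 := by
    intro p hp
    rw [List.mem_flatMap] at hp
    obtain ⟨it, hit, hpq⟩ := hp
    have hkeys : it.1 ∈ (tgCommon ts).keys := List.mem_map.mpr ⟨it, hit, rfl⟩
    obtain ⟨a, b, hab, -, -, -⟩ := tg_common_key_shape ts it.1 hkeys
    unfold tgOpsIf2 at hpq
    split at hpq
    · rcases List.mem_cons.mp hpq with rfl | hpq
      · rw [hab]; positivity
      · rcases List.mem_cons.mp hpq with rfl | hpq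
        · rw [hab]; positivity
        · exact absurd hpq (List.not_mem_nil)
    · exact absurd hpq (List.not_mem_nil)
  apply List.ext_getElem?
  intro i
  rw [List.getElem?_map]
  by_cases hi : i < ts.length
  · rw [tgApp_foldl_getElem? _ _ _ hnonneg, List.getElem?_replicate, if_pos hi,
      List.getElem?_map, List.getElem?_range hi]
    simp only [Option.map_some, List.nil_append]
    rw [tg_opsB_filter ts i, tg_sorted_pB ts i hi]
  · have h1 : ((((tgCommon ts).items.flatMap tgOpsIf2).foldl tgApp
        (List.replicate ts.length ([] : List Int))))[i]? = none :=
      List.getElem?_eq_none (by rw [tgApp_foldl_length, List.length_replicate]; omega)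
    have h2 : (((List.range ts.length).map (tgNbrs ts)))[i]? = none :=
      List.getElem?_eq_none (by rw [List.length_map, List.length_range]; omega)
    rw [h1, h2]
    rfl

-- ===== VERDICT (by name: the statement is the Claim_ definition above) =====
theorem createTriangleGraph_spec : Claim_equal_createTriangleGraph := by
  intro ts _
  show createTriangleGraph ts = createTriangleGraph_alt ts
  have h1 : (createTriangleGraph ts).1 = ts := rfl
  have h2 : (createTriangleGraph_alt ts).1 = ts := rfl
  have := tg_A_snd ts
  have := tg_B_snd ts
  apply Prod.ext <;> simp_all
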